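-- pv_equiv track=rewrite | github.com/pypi-data/pypi-mirror-369 | packages/rstbuddy/rstbuddy-0.3.1.tar.gz/rstbuddy-0.3.1/rstbuddy/services/pandoc_converter.py | _remove_empty_sections
-- ===== SOURCE A (Python) =====
-- def _remove_empty_sections(content: str) -> str:
--     """
--     Remove empty sections from the content.
--
--     Args:
--         content: The content to process
--
--     Returns:
--         Content with empty sections removed
--
--     """
--     lines = content.split("\n")
--     result_lines = []
--     skip_until_next_heading = False
--
--     for i, line in enumerate(lines):
--         # Check if this is a heading
--         if line.startswith("#"):
--             # Look ahead to see if this section is empty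
--             section_content = []
--             j = i + 1
--             while j < len(lines) and not lines[j].startswith("#"):
--                 if lines[j].strip():
--                     section_content.append(lines[j])
--                 j += 1
--
--             # If section has content, include it
--             if section_content:
--                 skip_until_next_heading = False
--                 result_lines.append(line)
--             else:
--                 # Skip this heading and its empty content
--                 skip_until_next_heading = True
--         elif not skip_until_next_heading:
--             result_lines.append(line)
--
--     return "\n".join(result_lines)
-- ===== SOURCE B (Python) =====
-- def _remove_empty_sections(content: str) -> str:
--     """Group lines into a preamble and (heading, body) segments, then
--     keep only segments whose body has non-blank content."""
--     lines = content.split("\n")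
--     i = 0
--     preamble = []
--     while i < len(lines) and not lines[i].startswith("#"):
--         preamble.append(lines[i])
--         i += 1
--     segments = []
--     while i < len(lines):
--         heading = lines[i]
--         i += 1
--         body = []
--         while i < len(lines) and not lines[i].startswith("#"):
--             body.append(lines[i])
--             i += 1
--         segments.append((heading, body))
--     out = list(preamble)
--     for heading, body in segments:
--         if any(b.strip() for b in body):
--             out.append(heading)
--             out.extend(body)
--     return "\n".join(out)
-- ===== Notes on version B (the rewrite author's own statement) =====
-- stated objective: simpler
-- what changed: Replaces A's single pass with a skip flag and a per-heading look-ahead rescan by a group-then-filter decomposition: split the lines into a preamble plus (heading, body) segments, then emit the preamble and exactly the segments whose body has a non-blank line.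
import Mathlib
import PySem

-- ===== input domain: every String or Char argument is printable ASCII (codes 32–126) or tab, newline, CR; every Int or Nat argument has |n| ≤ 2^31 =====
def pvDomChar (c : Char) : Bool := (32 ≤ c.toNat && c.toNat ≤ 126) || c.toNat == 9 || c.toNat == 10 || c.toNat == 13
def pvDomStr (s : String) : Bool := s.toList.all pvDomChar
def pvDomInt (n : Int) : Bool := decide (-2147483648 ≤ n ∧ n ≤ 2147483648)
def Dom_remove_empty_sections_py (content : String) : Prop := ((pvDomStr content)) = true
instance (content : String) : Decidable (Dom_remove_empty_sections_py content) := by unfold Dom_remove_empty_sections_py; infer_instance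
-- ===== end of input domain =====

-- B replaces A's single look-ahead pass with a skip flag by an explicit
-- group-into-sections-then-filter decomposition (objective: simpler).

def pvIsHeading (l : String) : Bool := PySem.Str.startswith l "#"

-- ===== PORT A =====
-- A's inner look-ahead while loop: collect the non-blank lines of the section.
def pvSectionContent : List String → List String
  | [] => []
  | x :: xs =>
    if pvIsHeading x then []
    else if PySem.Str.strip x ≠ "" then x :: pvSectionContent xs
    else pvSectionContent xs

-- A's main for loop over the lines, carrying the skip flag.
def pvGoA : List String → Bool → List String
  | [], _ => []
  | l :: rest, skip =>
    if pvIsHeading l then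
      if pvSectionContent rest ≠ [] then l :: pvGoA rest false
      else pvGoA rest true
    else if skip then pvGoA rest skip else l :: pvGoA rest skip

def remove_empty_sections_py (content : String) : String :=
  PySem.Str.join "\n" (pvGoA ((PySem.Str.split? content "\n").getD []) false)

-- ===== PORT B =====
-- B's segment parser: heading plus its body lines, up to the next heading.
def pvParseSegs (lines : List String) : List (String × List String) :=
  match lines with
  | [] => []
  | h :: rest =>
    (h, rest.takeWhile (fun l => !pvIsHeading l)) ::
      pvParseSegs (rest.dropWhile (fun l => !pvIsHeading l))
termination_by lines.length
decreasing_by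
  simp only [List.length_cons]
  exact Nat.lt_succ_of_le (List.length_dropWhile_le _ _)

def remove_empty_sections_py_alt (content : String) : String :=
  let lines := (PySem.Str.split? content "\n").getD []
  let preamble := lines.takeWhile (fun l => !pvIsHeading l)
  let segs := pvParseSegs (lines.dropWhile (fun l => !pvIsHeading l))
  let out := segs.foldl
    (fun acc s =>
      if s.2.any (fun b => decide (PySem.Str.strip b ≠ "")) then acc ++ s.1 :: s.2
      else acc) preamble
  PySem.Str.join "\n" out

-- ===== PRECONDITION & SPEC =====
def Spec_remove_empty_sections_py (content : String) (out : String) : Prop := out = remove_empty_sections_py_alt content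
instance (content : String) (out : String) : Decidable (Spec_remove_empty_sections_py content out) := by unfold Spec_remove_empty_sections_py; infer_instance

-- ===== CLAIM (what is proved, stated in full; the proofs are below) =====
def Claim_equal_remove_empty_sections_py : Prop := ∀ (content : String), Dom_remove_empty_sections_py content → Spec_remove_empty_sections_py content (remove_empty_sections_py content)

-- ===== LEMMAS AND PROOFS =====

-- what B emits for one segment
def pvEmitSeg (s : String × List String) : List String :=
  if s.2.any (fun b => decide (PySem.Str.strip b ≠ "")) then s.1 :: s.2 else []

lemma pvSectionContent_eq (xs : List String) :
    pvSectionContent xs =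
      (xs.takeWhile (fun l => !pvIsHeading l)).filter
        (fun b => decide (PySem.Str.strip b ≠ "")) := by
  induction xs with
  | nil => rfl
  | cons x xs ih =>
    by_cases h : pvIsHeading x = true
    · simp [pvSectionContent, h]
    · simp only [Bool.not_eq_true] at h
      by_cases hb : PySem.Str.strip x ≠ ""
      · simp [pvSectionContent, h, hb, ih]
      · simp [pvSectionContent, h, hb, ih]

lemma pvGoA_nonheading_prefix (b : List String) (r : List String) (skip : Bool)
    (hb : ∀ l ∈ b, pvIsHeading l = false) :
    pvGoA (b ++ r) skip = (if skip then [] else b) ++ pvGoA r skip := by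
  induction b with
  | nil => simp
  | cons x xs ih =>
    have hx : pvIsHeading x = false := hb x (by simp)
    have ih' := ih (fun l hl => hb l (by simp [hl]))
    cases skip <;> simp [pvGoA, hx, ih']

lemma pvHead_dropWhile {α : Type} (p : α → Bool) :
    ∀ (l : List α) (x : α) (xs : List α), l.dropWhile p = x :: xs → p x = false := by
  intro l
  induction l with
  | nil => intro x xs h; simp [List.dropWhile] at h
  | cons a as ih =>
    intro x xs h
    by_cases ha : p a = true
    · rw [List.dropWhile_cons_of_pos ha] at h; exact ih x xs h
    · rw [List.dropWhile_cons_of_neg ha] at h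
      cases h; simpa using ha

lemma pvGoA_main : ∀ (n : Nat) (lines : List String) (skip : Bool),
    lines.length ≤ n →
    pvGoA lines skip =
      (if skip then [] else lines.takeWhile (fun l => !pvIsHeading l)) ++
        (pvParseSegs (lines.dropWhile (fun l => !pvIsHeading l))).flatMap pvEmitSeg := by
  intro n
  induction n with
  | zero =>
    intro lines skip h
    have : lines = [] := List.eq_nil_of_length_eq_zero (Nat.le_zero.mp h)
    subst this; cases skip <;> simp [pvGoA, pvParseSegs]
  | succ n ih =>
    intro lines skip hlen
    conv_lhs => rw [← List.takeWhile_append_dropWhile (p := fun l => !pvIsHeading l) (l := lines)]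
    rw [pvGoA_nonheading_prefix _ _ _ (fun l hl => by
      have := List.mem_takeWhile_imp hl
      simpa using this)]
    congr 1
    cases hdw : lines.dropWhile (fun l => !pvIsHeading l) with
    | nil => simp [pvGoA, pvParseSegs]
    | cons h rest =>
      have hh : pvIsHeading h = true := by
        have := pvHead_dropWhile (fun l => !pvIsHeading l) lines h rest hdw
        simpa using this
      have hrest : rest.length ≤ n := by
        have h1 : (lines.dropWhile (fun l => !pvIsHeading l)).length ≤ lines.length :=
          List.length_dropWhile_le _ _
        rw [hdw] at h1
        simp only [List.length_cons] at h1
        omega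
      have hsec := pvSectionContent_eq rest
      have hunfold : pvGoA (h :: rest) skip =
          if pvSectionContent rest ≠ [] then h :: pvGoA rest false else pvGoA rest true := by
        cases skip <;> simp [pvGoA, hh]
      rw [hunfold, pvParseSegs]
      simp only [List.flatMap_cons]
      cases hc : (rest.takeWhile (fun l => !pvIsHeading l)).any
          (fun b => decide (PySem.Str.strip b ≠ "")) with
      | true =>
        have hne : pvSectionContent rest ≠ [] := by
          rw [hsec]
          intro hnil
          rw [List.filter_eq_nil_iff] at hnil
          obtain ⟨x, hx, hpx⟩ := List.any_eq_true.mp hc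
          exact hnil x hx hpx
        rw [if_pos hne, ih rest false hrest]
        have hemit : pvEmitSeg (h, rest.takeWhile (fun l => !pvIsHeading l)) =
            h :: rest.takeWhile (fun l => !pvIsHeading l) := by
          simp only [pvEmitSeg]
          rw [if_pos hc]
        rw [hemit]
        simp
      | false =>
        have hemp : pvSectionContent rest = [] := by
          rw [hsec, List.filter_eq_nil_iff]
          intro a ha hpa
          have h2 : (rest.takeWhile (fun l => !pvIsHeading l)).any
              (fun b => decide (PySem.Str.strip b ≠ "")) = true :=
            List.any_eq_true.mpr ⟨a, ha, by simpa using hpa⟩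
          rw [hc] at h2
          cases h2
        rw [if_neg (by simp [hemp]), ih rest true hrest]
        have hemit : pvEmitSeg (h, rest.takeWhile (fun l => !pvIsHeading l)) = [] := by
          simp only [pvEmitSeg]
          rw [hc]
          simp
        rw [hemit]
        simp

-- ===== VERDICT (by name: the statement is the Claim_ definition above) =====
theorem remove_empty_sections_py_spec : Claim_equal_remove_empty_sections_py := by
  intro content _
  unfold Spec_remove_empty_sections_py remove_empty_sections_py remove_empty_sections_py_alt
  set lines := (PySem.Str.split? content "\n").getD [] with hl
  congr 1
  rw [pvGoA_main lines.length lines false le_rfl]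
  rw [PySem.List.foldl_congr_mem _ _
      (fun acc s => acc ++ pvEmitSeg s) _
      (fun acc s _ => by
        by_cases hb : (s.2.any (fun b => decide (PySem.Str.strip b ≠ ""))) = true
        · simp only [pvEmitSeg]
          rw [if_pos hb, if_pos hb]
        · simp only [pvEmitSeg]
          rw [if_neg hb, if_neg hb]
          simp)]
  rw [PySem.List.foldl_append_eq_flatMap]
  simp
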